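-- pv_equiv track=rewrite | github.com/lythx/concurrency-theory-course | lab5/main.py | compute_dependency_graph
-- ===== SOURCE A (Python) =====
-- def compute_dependency_graph(word: str, D: set[tuple[str, str]]) -> dict[int, set[int]]:
--     dependency_graph: dict[int, set[int]] = {}
--     for i, char1 in enumerate(word):
--         dependency_graph[i] = set()
--         for j, char2 in enumerate(word[i + 1 :], start=i + 1):
--             if (char1, char2) in D:
--                 dependency_graph[i].add(j)
--     return dependency_graph
-- ===== SOURCE B (Python) =====
-- def compute_dependency_graph(word: str, D: set[tuple[str, str]]) -> dict[int, set[int]]: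
--     # Inverted indexes: positions of each character, and predecessors of each character in D.
--     pos: dict[str, list[int]] = {}
--     for i, c in enumerate(word):
--         pos.setdefault(c, []).append(i)
--     pred: dict[str, list[str]] = {}
--     for c1, c2 in D:
--         pred.setdefault(c2, []).append(c1)
--     graph: dict[int, set[int]] = {i: set() for i in range(len(word))}
--     for j, c in enumerate(word):
--         for c1 in pred.get(c, []):
--             for i in pos.get(c1, []):
--                 if i < j:
--                     graph[i].add(j)
--     return graph
-- ===== Notes on version B (the rewrite author's own statement) =====
-- stated objective: faster
-- what changed: A scans, for every position i, all later positions j and tests each character pair against D; B instead builds two inverted indexes once (character -> positions in word, character -> its D-predecessors), pre-initializes every position's empty set, and fills the graph in a single pass over positions j by looking up only the earlier positions that can actually precede word[j].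
import Mathlib
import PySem

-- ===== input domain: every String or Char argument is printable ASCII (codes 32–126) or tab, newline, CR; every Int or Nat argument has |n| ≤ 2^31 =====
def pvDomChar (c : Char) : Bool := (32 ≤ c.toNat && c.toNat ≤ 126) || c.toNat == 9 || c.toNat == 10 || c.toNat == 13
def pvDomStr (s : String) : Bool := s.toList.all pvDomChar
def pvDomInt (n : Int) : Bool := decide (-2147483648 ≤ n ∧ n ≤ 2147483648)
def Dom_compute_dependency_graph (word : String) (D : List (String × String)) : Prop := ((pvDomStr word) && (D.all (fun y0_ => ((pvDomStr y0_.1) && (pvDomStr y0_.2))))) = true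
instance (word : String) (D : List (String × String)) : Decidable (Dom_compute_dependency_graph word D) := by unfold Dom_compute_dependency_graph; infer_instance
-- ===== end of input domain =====

-- B replaces A's row-wise nested position scan by inverted indexes (char → positions, char → D-predecessors)
-- driven by a single pass over the positions j; objective: alternative decomposition, same exact dict of sets.

-- ===== PORT A =====
-- literal transliteration of A: for i,c1 in enumerate(word): g[i]=set(); for j,c2 in enumerate(word[i+1:], i+1): if (c1,c2) in D: g[i].add(j)
-- g[i].add(j) is Dict.modify at key i (always present here); PySem.Set.empty is the default, never used.
def compute_dependency_graph (word : String) (D : List (String × String)) : List (Int × List Int) :=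
  let cs := word.toList
  ((PySem.List.enumerate cs 0).foldl
    (fun g p =>
      (PySem.List.enumerate (PySem.List.slice cs (some (p.1 + 1)) none) (p.1 + 1)).foldl
        (fun g q =>
          if D.contains (String.singleton p.2, String.singleton q.2) then
            g.modify p.1 PySem.Set.empty (fun s => PySem.Set.add s q.1)
          else g)
        (g.insert p.1 (PySem.Set.empty : PySem.Set Int)))
    (PySem.Dict.empty : PySem.Dict Int (PySem.Set Int))).items

-- ===== PORT B =====
-- transliteration of Source B: pos.setdefault(c,[]).append(i) / pred.setdefault(c2,[]).append(c1) are Dict.modify with default [];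
-- graph[i].add(j) is Dict.modify at key i (always present), default PySem.Set.empty never used.
def compute_dependency_graph_alt (word : String) (D : List (String × String)) : List (Int × List Int) :=
  let cs := word.toList
  let pos : PySem.Dict String (List Int) :=
    (PySem.List.enumerate cs 0).foldl
      (fun d p => d.modify (String.singleton p.2) [] (fun l => l ++ [p.1])) PySem.Dict.empty
  let pred : PySem.Dict String (List String) :=
    D.foldl (fun d q => d.modify q.2 [] (fun l => l ++ [q.1])) PySem.Dict.empty
  let g0 : PySem.Dict Int (PySem.Set Int) :=
    (PySem.List.pyRange 0 cs.length 1).foldl (fun d i => d.insert i PySem.Set.empty) PySem.Dict.empty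
  ((PySem.List.enumerate cs 0).foldl
    (fun g p =>
      (pred.getD (String.singleton p.2) []).foldl
        (fun g c1 =>
          (pos.getD c1 []).foldl
            (fun g i =>
              if i < p.1 then g.modify i PySem.Set.empty (fun s => PySem.Set.add s p.1) else g)
            g)
        g)
    g0).items

-- ===== PRECONDITION & SPEC =====
def Spec_compute_dependency_graph (word : String) (D : List (String × String)) (out : List (Int × List Int)) : Prop := out = compute_dependency_graph_alt word D
instance (word : String) (D : List (String × String)) (out : List (Int × List Int)) : Decidable (Spec_compute_dependency_graph word D out) := by unfold Spec_compute_dependency_graph; infer_instance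

-- ===== CLAIM (what is proved, stated in full; the proofs are below) =====
def Claim_equal_compute_dependency_graph : Prop := ∀ (word : String) (D : List (String × String)), Dom_compute_dependency_graph word D → Spec_compute_dependency_graph word D (compute_dependency_graph word D)

-- ===== LEMMAS AND PROOFS =====

-- the character-pair relation A tests
def pvRel (D : List (String × String)) (c1 c2 : Char) : Bool :=
  D.contains (String.singleton c1, String.singleton c2)

-- A's per-position value
def pvValA (D : List (String × String)) (cs : List Char) (p : Int × Char) : List Int :=
  ((PySem.List.enumerate (PySem.List.slice cs (some (p.1 + 1)) none) (p.1 + 1)).filter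
      (fun q => pvRel D p.2 q.2)).map (fun q => q.1)

-- B's inverted indexes as pure functions
def pvPosL (cs : List Char) (c1 : String) : List Int :=
  ((PySem.List.enumerate cs 0).filter (fun p => String.singleton p.2 == c1)).map (fun p => p.1)

def pvPredL (D : List (String × String)) (s2 : String) : List String :=
  (D.filter (fun q => q.2 == s2)).map (fun q => q.1)

-- B's step over one position p = (j, c)
def pvStepB (D : List (String × String)) (cs : List Char)
    (g : PySem.Dict Int (PySem.Set Int)) (p : Int × Char) : PySem.Dict Int (PySem.Set Int) :=
  (pvPredL D (String.singleton p.2)).foldl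
    (fun g c1 =>
      (pvPosL cs c1).foldl
        (fun g i =>
          if i < p.1 then g.modify i PySem.Set.empty (fun s => PySem.Set.add s p.1) else g)
        g)
    g

-- B's filter predicate for position i over pairs p = (j, c)
def pvCondB (D : List (String × String)) (cs : List Char) (i : Int) (p : Int × Char) : Bool :=
  decide (i < p.1) && (pvPredL D (String.singleton p.2)).any (fun c1 => (pvPosL cs c1).contains i)

lemma pv_modify_insert (g : PySem.Dict Int (PySem.Set Int)) (i : Int) (s : PySem.Set Int)
    (f : PySem.Set Int → PySem.Set Int) :
    (g.insert i s).modify i PySem.Set.empty f = g.insert i (f s) := by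
  unfold PySem.Dict.modify
  rw [PySem.Dict.getD_insert_self, PySem.Dict.insert_insert_self]

lemma pv_innerA (D : List (String × String)) (c1 : Char) (i : Int) :
    ∀ (L : List (Int × Char)) (g : PySem.Dict Int (PySem.Set Int)) (s : PySem.Set Int),
      (∀ q ∈ L, q.1 ∉ s) → (L.map (fun q => q.1)).Nodup →
      L.foldl
        (fun g q =>
          if D.contains (String.singleton c1, String.singleton q.2) then
            g.modify i PySem.Set.empty (fun t => PySem.Set.add t q.1)
          else g)
        (g.insert i s)
      = g.insert i (s ++ (L.filter (fun q => pvRel D c1 q.2)).map (fun q => q.1)) := by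
  intro L
  induction L with
  | nil => intro g s _ _; simp
  | cons q L ih =>
    intro g s h1 h2
    simp only [List.foldl_cons]
    by_cases hrel : D.contains (String.singleton c1, String.singleton q.2)
    · rw [if_pos hrel, pv_modify_insert,
        PySem.Set.add_of_not_mem (h1 q (List.mem_cons_self)), ih]
      · have hm : (String.singleton c1, String.singleton q.2) ∈ D := by simpa using hrel
        simp only [List.filter_cons, pvRel]
        simp [hm]
      · intro q' hq'
        simp only [List.mem_append, List.mem_singleton, not_or]
        refine ⟨h1 q' (List.mem_cons_of_mem _ hq'), ?_⟩
        simp only [List.map_cons, List.nodup_cons, List.mem_map] at h2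
        exact fun he => h2.1 ⟨q', hq', he⟩
      · simp only [List.map_cons, List.nodup_cons] at h2
        exact h2.2
    · rw [if_neg hrel, ih g s (fun q' hq' => h1 q' (List.mem_cons_of_mem _ hq'))
        (by simp only [List.map_cons, List.nodup_cons] at h2; exact h2.2)]
      have hm : ¬ ((String.singleton c1, String.singleton q.2) ∈ D) := by simpa using hrel
      simp only [List.filter_cons, pvRel]
      simp [hm]

lemma pv_outerA (D : List (String × String)) (cs : List Char) :
    ∀ (suf : List Char) (k : Int) (g : PySem.Dict Int (PySem.Set Int)),
      (∀ j : Int, k ≤ j → g.contains j = false) →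
      ((PySem.List.enumerate suf k).foldl
        (fun g p =>
          (PySem.List.enumerate (PySem.List.slice cs (some (p.1 + 1)) none) (p.1 + 1)).foldl
            (fun g q =>
              if D.contains (String.singleton p.2, String.singleton q.2) then
                g.modify p.1 PySem.Set.empty (fun s => PySem.Set.add s q.1)
              else g)
            (g.insert p.1 (PySem.Set.empty : PySem.Set Int)))
        g).items
      = g.items ++ (PySem.List.enumerate suf k).map (fun p => (p.1, pvValA D cs p)) := by
  intro suf
  induction suf with
  | nil => intro k g _; simp [PySem.List.enumerate]
  | cons c suf ih =>
    intro k g hg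
    rw [PySem.List.enumerate_cons]
    simp only [List.foldl_cons, List.map_cons]
    have hstep :
        (PySem.List.enumerate (PySem.List.slice cs (some (k + 1)) none) (k + 1)).foldl
          (fun g q =>
            if D.contains (String.singleton c, String.singleton q.2) then
              g.modify k PySem.Set.empty (fun s => PySem.Set.add s q.1)
            else g)
          (g.insert k (PySem.Set.empty : PySem.Set Int))
        = g.insert k (pvValA D cs (k, c)) := by
      rw [pv_innerA D c k _ g PySem.Set.empty (by intro q _; simp [PySem.Set.empty])
        (by rw [PySem.List.map_fst_enumerate]; exact PySem.List.nodup_pyRange_one _ _)]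
      rfl
    rw [hstep, ih (k + 1)]
    · rw [PySem.Dict.items_insert_of_not_contains _ _ (hg k le_rfl)]
      simp
    · intro j hj
      rw [PySem.Dict.contains_insert]
      have hne : (j == k) = false := by simp; omega
      rw [hne, Bool.false_or]
      exact hg j (by omega)

lemma pvA_items (word : String) (D : List (String × String)) :
    compute_dependency_graph word D
      = (PySem.List.enumerate word.toList 0).map (fun p => (p.1, pvValA D word.toList p)) := by
  show ((PySem.List.enumerate word.toList 0).foldl _ PySem.Dict.empty).items = _
  rw [pv_outerA D word.toList word.toList 0 PySem.Dict.empty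
    (fun j _ => PySem.Dict.contains_empty j)]
  rfl

lemma pv_posL (cs : List Char) (c1 : String) :
    ((PySem.List.enumerate cs 0).foldl
      (fun d p => d.modify (String.singleton p.2) [] (fun l => l ++ [p.1]))
      (PySem.Dict.empty : PySem.Dict String (List Int))).getD c1 []
    = pvPosL cs c1 := by
  have h := PySem.Dict.getD_foldl_modify_append
    ((PySem.List.enumerate cs 0).map (fun p => (String.singleton p.2, p.1)))
    (PySem.Dict.empty : PySem.Dict String (List Int)) c1
  rw [List.foldl_map] at h
  simpa [pvPosL, List.filter_map, Function.comp] using h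

lemma pv_predL (D : List (String × String)) (s2 : String) :
    (D.foldl (fun d q => d.modify q.2 [] (fun l => l ++ [q.1]))
      (PySem.Dict.empty : PySem.Dict String (List String))).getD s2 []
    = pvPredL D s2 := by
  have h := PySem.Dict.getD_foldl_modify_append
    (D.map (fun q => (q.2, q.1)))
    (PySem.Dict.empty : PySem.Dict String (List String)) s2
  rw [List.foldl_map] at h
  simpa [pvPredL, List.filter_map, Function.comp] using h

lemma pv_add_idem (s : PySem.Set Int) (j : Int) :
    PySem.Set.add (PySem.Set.add s j) j = PySem.Set.add s j :=
  PySem.Set.add_of_mem ((PySem.Set.mem_add s j j).mpr (Or.inr rfl))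

lemma pv_innerB2 (j : Int) :
    ∀ (is : List Int) (g : PySem.Dict Int (PySem.Set Int)) (i : Int),
      (is.foldl
        (fun g i' =>
          if i' < j then g.modify i' PySem.Set.empty (fun s => PySem.Set.add s j) else g)
        g).getD i PySem.Set.empty
      = if i < j ∧ i ∈ is then PySem.Set.add (g.getD i PySem.Set.empty) j
        else g.getD i PySem.Set.empty := by
  intro is
  induction is with
  | nil => intro g i; simp
  | cons i' is ih =>
    intro g i
    simp only [List.foldl_cons]
    by_cases hlt : i' < j
    · rw [if_pos hlt, ih]
      by_cases hii : i = i'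
      · subst hii
        rw [PySem.Dict.getD_modify]
        simp only [if_pos rfl]
        by_cases hmem : i ∈ is
        · simp [hlt, hmem, pv_add_idem]
        · simp [hlt, hmem]
      · rw [PySem.Dict.getD_modify]
        simp only [if_neg hii]
        by_cases hc : i < j ∧ i ∈ is
        · simp [hc, List.mem_cons, hii, hc.1, hc.2]
        · have : ¬ (i < j ∧ (i = i' ∨ i ∈ is)) := by
            intro ⟨h1, h2⟩; rcases h2 with h2 | h2
            · exact hii h2
            · exact hc ⟨h1, h2⟩
          simp only [List.mem_cons]
          rw [if_neg hc, if_neg this]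
    · rw [if_neg hlt, ih]
      by_cases hii : i = i'
      · subst hii
        by_cases hc : i < j ∧ i ∈ is
        · exact absurd hc.1 hlt
        · have : ¬ (i < j ∧ i ∈ i :: is) := fun h => hlt h.1
          rw [if_neg hc, if_neg this]
      · by_cases hc : i < j ∧ i ∈ is
        · have : i < j ∧ i ∈ i' :: is := ⟨hc.1, List.mem_cons_of_mem _ hc.2⟩
          rw [if_pos hc, if_pos this]
        · have : ¬ (i < j ∧ i ∈ i' :: is) := by
            intro ⟨h1, h2⟩
            rcases List.mem_cons.mp h2 with h2 | h2
            · exact hii h2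
            · exact hc ⟨h1, h2⟩
          rw [if_neg hc, if_neg this]

lemma pv_innerB1 (cs : List Char) (j : Int) :
    ∀ (cs1 : List String) (g : PySem.Dict Int (PySem.Set Int)) (i : Int),
      (cs1.foldl
        (fun g c1 =>
          (pvPosL cs c1).foldl
            (fun g i' =>
              if i' < j then g.modify i' PySem.Set.empty (fun s => PySem.Set.add s j) else g)
            g)
        g).getD i PySem.Set.empty
      = if i < j ∧ ∃ c1 ∈ cs1, i ∈ pvPosL cs c1 then PySem.Set.add (g.getD i PySem.Set.empty) j
        else g.getD i PySem.Set.empty := by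
  intro cs1
  induction cs1 with
  | nil => intro g i; simp
  | cons c1 cs1 ih =>
    intro g i
    simp only [List.foldl_cons]
    rw [ih, pv_innerB2]
    by_cases h1 : i < j ∧ i ∈ pvPosL cs c1
    · rw [if_pos h1]
      by_cases h2 : i < j ∧ ∃ c ∈ cs1, i ∈ pvPosL cs c
      · rw [if_pos h2, pv_add_idem,
          if_pos ⟨h1.1, ⟨c1, List.mem_cons_self, h1.2⟩⟩]
      · rw [if_neg h2, if_pos ⟨h1.1, ⟨c1, List.mem_cons_self, h1.2⟩⟩]
    · by_cases h2 : i < j ∧ ∃ c ∈ cs1, i ∈ pvPosL cs c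
      · rw [if_neg h1, if_pos h2]
        obtain ⟨hlt, c, hc, hm⟩ := h2
        rw [if_pos ⟨hlt, ⟨c, List.mem_cons_of_mem _ hc, hm⟩⟩]
      · rw [if_neg h1, if_neg h2]
        have : ¬ (i < j ∧ ∃ c ∈ c1 :: cs1, i ∈ pvPosL cs c) := by
          intro ⟨hlt, c, hc, hm⟩
          rcases List.mem_cons.mp hc with hc | hc
          · exact h1 ⟨hlt, hc ▸ hm⟩
          · exact h2 ⟨hlt, ⟨c, hc, hm⟩⟩
        rw [if_neg this]

lemma pv_stepB_getD (D : List (String × String)) (cs : List Char)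
    (g : PySem.Dict Int (PySem.Set Int)) (p : Int × Char) (i : Int) :
    (pvStepB D cs g p).getD i PySem.Set.empty
    = if pvCondB D cs i p then PySem.Set.add (g.getD i PySem.Set.empty) p.1
      else g.getD i PySem.Set.empty := by
  unfold pvStepB
  rw [pv_innerB1 cs p.1]
  by_cases h : i < p.1 ∧ ∃ c1 ∈ pvPredL D (String.singleton p.2), i ∈ pvPosL cs c1
  · rw [if_pos h, if_pos]
    simp only [pvCondB, Bool.and_eq_true, decide_eq_true_eq, List.any_eq_true]
    exact ⟨h.1, by obtain ⟨c1, hc, hm⟩ := h.2; exact ⟨c1, hc, by simpa using hm⟩⟩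
  · rw [if_neg h, if_neg]
    simp only [pvCondB, Bool.and_eq_true, decide_eq_true_eq, List.any_eq_true]
    intro ⟨h1, c1, hc, hm⟩
    exact h ⟨h1, ⟨c1, hc, by simpa using hm⟩⟩

-- keys are unchanged by B's step (every modified key is already present)
lemma pv_keys_innerB2 (j : Int) :
    ∀ (is : List Int) (g : PySem.Dict Int (PySem.Set Int)),
      (∀ i' ∈ is, g.contains i' = true) →
      ((is.foldl
        (fun g i' =>
          if i' < j then g.modify i' PySem.Set.empty (fun s => PySem.Set.add s j) else g)
        g).keys = g.keys
      ∧ ∀ i' : Int,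
        (is.foldl
          (fun g i' =>
            if i' < j then g.modify i' PySem.Set.empty (fun s => PySem.Set.add s j) else g)
          g).contains i' = g.contains i') := by
  intro is
  induction is with
  | nil => intro g _; exact ⟨rfl, fun _ => rfl⟩
  | cons i0 is ih =>
    intro g hg
    simp only [List.foldl_cons]
    by_cases hlt : i0 < j
    · rw [if_pos hlt]
      have hck : ∀ i' : Int, (g.modify i0 PySem.Set.empty (fun s => PySem.Set.add s j)).contains i' = g.contains i' := by
        intro i'
        rw [PySem.Dict.contains_modify]
        by_cases h : i' = i0
        · subst h; simp [hg i' List.mem_cons_self]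
        · simp [h]
      have hkk : (g.modify i0 PySem.Set.empty (fun s => PySem.Set.add s j)).keys = g.keys := by
        rw [PySem.Dict.keys_modify, PySem.Dict.keys_insert_of_contains _ _ (hg i0 List.mem_cons_self)]
      obtain ⟨h1, h2⟩ := ih (g.modify i0 PySem.Set.empty (fun s => PySem.Set.add s j))
        (fun i' hi' => by rw [hck]; exact hg i' (List.mem_cons_of_mem _ hi'))
      exact ⟨h1.trans hkk, fun i' => (h2 i').trans (hck i')⟩
    · rw [if_neg hlt]
      exact ih g (fun i' hi' => hg i' (List.mem_cons_of_mem _ hi'))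

lemma pv_keys_innerB1 (cs : List Char) (j : Int) :
    ∀ (cs1 : List String) (g : PySem.Dict Int (PySem.Set Int)),
      (∀ c1 ∈ cs1, ∀ i' ∈ pvPosL cs c1, g.contains i' = true) →
      ((cs1.foldl
        (fun g c1 =>
          (pvPosL cs c1).foldl
            (fun g i' =>
              if i' < j then g.modify i' PySem.Set.empty (fun s => PySem.Set.add s j) else g)
            g)
        g).keys = g.keys
      ∧ ∀ i' : Int,
        (cs1.foldl
          (fun g c1 =>
            (pvPosL cs c1).foldl
              (fun g i' =>
                if i' < j then g.modify i' PySem.Set.empty (fun s => PySem.Set.add s j) else g)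
              g)
          g).contains i' = g.contains i') := by
  intro cs1
  induction cs1 with
  | nil => intro g _; exact ⟨rfl, fun _ => rfl⟩
  | cons c1 cs1 ih =>
    intro g hg
    simp only [List.foldl_cons]
    obtain ⟨h1, h2⟩ := pv_keys_innerB2 j (pvPosL cs c1) g (hg c1 List.mem_cons_self)
    obtain ⟨h3, h4⟩ := ih _ (fun c hc i' hi' => by rw [h2]; exact hg c (List.mem_cons_of_mem _ hc) i' hi')
    exact ⟨h3.trans h1, fun i' => (h4 i').trans (h2 i')⟩

lemma pv_stepB_keys (D : List (String × String)) (cs : List Char)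
    (g : PySem.Dict Int (PySem.Set Int)) (p : Int × Char)
    (hg : ∀ i' : Int, 0 ≤ i' → i' < (cs.length : Int) → g.contains i' = true) :
    (pvStepB D cs g p).keys = g.keys
    ∧ ∀ i' : Int, (pvStepB D cs g p).contains i' = g.contains i' := by
  unfold pvStepB
  apply pv_keys_innerB1
  intro c1 _ i' hi'
  have : 0 ≤ i' ∧ i' < (cs.length : Int) := by
    simp only [pvPosL, List.mem_map, List.mem_filter] at hi'
    obtain ⟨q, ⟨hq, _⟩, hqi⟩ := hi'
    rw [PySem.List.mem_enumerate_iff] at hq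
    obtain ⟨k, hk, rfl⟩ := hq
    subst hqi; constructor <;> [omega; (simp; omega)]
  exact hg i' this.1 this.2

lemma pv_loopB (D : List (String × String)) (cs : List Char) (i : Int) :
    ∀ (suf : List Char) (k : Int) (g : PySem.Dict Int (PySem.Set Int)),
      (∀ x ∈ g.getD i PySem.Set.empty, x < k) →
      ((PySem.List.enumerate suf k).foldl (pvStepB D cs) g).getD i PySem.Set.empty
      = g.getD i PySem.Set.empty
        ++ ((PySem.List.enumerate suf k).filter (fun p => pvCondB D cs i p)).map (fun p => p.1) := by
  intro suf
  induction suf with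
  | nil => intro k g _; simp [PySem.List.enumerate]
  | cons c suf ih =>
    intro k g hg
    rw [PySem.List.enumerate_cons]
    simp only [List.foldl_cons, List.filter_cons]
    by_cases hc : pvCondB D cs i (k, c)
    · rw [if_pos hc]
      have hstep : (pvStepB D cs g (k, c)).getD i PySem.Set.empty
          = g.getD i PySem.Set.empty ++ [k] := by
        rw [pv_stepB_getD, if_pos hc, PySem.Set.add_of_not_mem (fun hm => absurd (hg k hm) (by omega))]
      have hg' : ∀ x ∈ (pvStepB D cs g (k, c)).getD i PySem.Set.empty, x < k + 1 := by
        rw [hstep]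
        intro x hx
        rcases List.mem_append.mp hx with h | h
        · have := hg x h; omega
        · simp only [List.mem_singleton] at h; omega
      rw [ih (k + 1) _ hg', hstep]
      simp
    · rw [if_neg hc]
      have hstep : (pvStepB D cs g (k, c)).getD i PySem.Set.empty
          = g.getD i PySem.Set.empty := by
        rw [pv_stepB_getD, if_neg hc]
      have hg' : ∀ x ∈ (pvStepB D cs g (k, c)).getD i PySem.Set.empty, x < k + 1 := by
        rw [hstep]
        intro x hx
        have := hg x hx; omega
      rw [ih (k + 1) _ hg', hstep]

lemma pv_loopB_keys (D : List (String × String)) (cs : List Char) :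
    ∀ (L : List (Int × Char)) (g : PySem.Dict Int (PySem.Set Int)),
      (∀ i' : Int, 0 ≤ i' → i' < (cs.length : Int) → g.contains i' = true) →
      (L.foldl (pvStepB D cs) g).keys = g.keys := by
  intro L
  induction L with
  | nil => intro g _; rfl
  | cons p L ih =>
    intro g hg
    simp only [List.foldl_cons]
    obtain ⟨h1, h2⟩ := pv_stepB_keys D cs g p hg
    rw [ih _ (fun i' ha hb => by rw [h2]; exact hg i' ha hb), h1]

lemma pv_g0_items (cs : List Char) :
    ((PySem.List.pyRange 0 (cs.length : Int) 1).foldl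
      (fun d i => d.insert i PySem.Set.empty)
      (PySem.Dict.empty : PySem.Dict Int (PySem.Set Int))).items
    = (PySem.List.pyRange 0 (cs.length : Int) 1).map
        (fun i => (i, (PySem.Set.empty : PySem.Set Int))) := by
  have h := PySem.Dict.items_foldl_insert_fresh (PySem.List.pyRange 0 (cs.length : Int) 1)
    (fun a => a) (fun _ => (PySem.Set.empty : PySem.Set Int)) PySem.Dict.empty
    (fun a _ => PySem.Dict.contains_empty a)
    (by simpa using PySem.List.nodup_pyRange_one 0 (cs.length : Int))
  simpa using h

lemma pvB_items (word : String) (D : List (String × String)) :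
    compute_dependency_graph_alt word D
      = (PySem.List.pyRange 0 (word.toList.length : Int) 1).map
          (fun i => (i,
            ((PySem.List.enumerate word.toList 0).filter (fun p => pvCondB D word.toList i p)).map
              (fun p => p.1))) := by
  unfold compute_dependency_graph_alt
  simp only [pv_posL, pv_predL]
  show ((PySem.List.enumerate word.toList 0).foldl (pvStepB D word.toList)
      ((PySem.List.pyRange 0 (word.toList.length : Int) 1).foldl
        (fun d i => d.insert i PySem.Set.empty)
        (PySem.Dict.empty : PySem.Dict Int (PySem.Set Int)))).items = _
  have hkeys0 :
      ((PySem.List.pyRange 0 (word.toList.length : Int) 1).foldl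
        (fun d i => d.insert i PySem.Set.empty)
        (PySem.Dict.empty : PySem.Dict Int (PySem.Set Int))).keys
      = PySem.List.pyRange 0 (word.toList.length : Int) 1 := by
    simp only [PySem.Dict.keys, pv_g0_items, List.map_map]
    simp [Function.comp_def]
  have hcont0 : ∀ i' : Int, 0 ≤ i' → i' < (word.toList.length : Int) →
      ((PySem.List.pyRange 0 (word.toList.length : Int) 1).foldl
        (fun d i => d.insert i PySem.Set.empty)
        (PySem.Dict.empty : PySem.Dict Int (PySem.Set Int))).contains i' = true := by
    intro i' ha hb
    rw [PySem.Dict.contains_iff_mem_keys, hkeys0]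
    exact PySem.List.mem_pyRange_one.mpr ⟨ha, hb⟩
  have hkeysF := pv_loopB_keys D word.toList (PySem.List.enumerate word.toList 0) _ hcont0
  have hnodup :
      ((PySem.List.enumerate word.toList 0).foldl (pvStepB D word.toList)
        ((PySem.List.pyRange 0 (word.toList.length : Int) 1).foldl
          (fun d i => d.insert i PySem.Set.empty)
          (PySem.Dict.empty : PySem.Dict Int (PySem.Set Int)))).keys.Nodup := by
    rw [hkeysF, hkeys0]; exact PySem.List.nodup_pyRange_one _ _
  rw [PySem.Dict.items_eq_map_keys _ hnodup PySem.Set.empty, hkeysF, hkeys0]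
  apply List.map_congr_left
  intro i hi
  rw [PySem.List.mem_pyRange_one] at hi
  have hmem0 : (i, (PySem.Set.empty : PySem.Set Int)) ∈
      ((PySem.List.pyRange 0 (word.toList.length : Int) 1).foldl
        (fun d i => d.insert i PySem.Set.empty)
        (PySem.Dict.empty : PySem.Dict Int (PySem.Set Int))).items := by
    rw [pv_g0_items]
    exact List.mem_map.mpr ⟨i, PySem.List.mem_pyRange_one.mpr hi, rfl⟩
  have hnodup0 :
      ((PySem.List.pyRange 0 (word.toList.length : Int) 1).foldl
        (fun d i => d.insert i PySem.Set.empty)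
        (PySem.Dict.empty : PySem.Dict Int (PySem.Set Int))).keys.Nodup := by
    rw [hkeys0]; exact PySem.List.nodup_pyRange_one _ _
  have hget0 := PySem.Dict.getD_of_mem_items _ hmem0 hnodup0 (PySem.Set.empty : PySem.Set Int)
  rw [pv_loopB D word.toList i word.toList 0 _
      (by rw [hget0]; intro x hx; simp [PySem.Set.empty] at hx), hget0]
  simp [PySem.Set.empty]

lemma pv_any_eq (D : List (String × String)) (cs : List Char) (i : Int)
    (h0 : 0 ≤ i) (h1 : i < (cs.length : Int)) (s2 : String) :
    (pvPredL D s2).any (fun c1 => (pvPosL cs c1).contains i)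
    = D.contains (String.singleton (PySem.List.pyGetD cs i 'a'), s2) := by
  have hi : i.toNat < cs.length := by omega
  have hget : PySem.List.pyGetD cs i 'a' = cs[i.toNat] := by
    rw [PySem.List.pyGetD_of_nonneg cs 'a' h0, List.getD_eq_getElem cs 'a' hi]
  have hpos : ∀ c1 : String, i ∈ pvPosL cs c1 ↔ String.singleton cs[i.toNat] = c1 := by
    intro c1
    simp only [pvPosL, List.mem_map, List.mem_filter, PySem.List.mem_enumerate_iff]
    constructor
    · rintro ⟨p, ⟨⟨k, hk, rfl⟩, hbeq⟩, hfst⟩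
      simp only [zero_add] at hfst
      have : k = i.toNat := by omega
      subst this
      simpa using hbeq
    · intro h
      refine ⟨(i, cs[i.toNat]), ⟨⟨i.toNat, hi, by simp; omega⟩, by simpa using h⟩, rfl⟩
  rw [Bool.eq_iff_iff]
  simp only [List.any_eq_true, List.contains_iff_mem, hget]
  constructor
  · rintro ⟨c1, hc1, hmem⟩
    simp only [pvPredL, List.mem_map, List.mem_filter, beq_iff_eq] at hc1
    obtain ⟨q, ⟨hq, hq2⟩, hq1⟩ := hc1
    have := (hpos c1).mp hmem
    have hqe : q = (String.singleton cs[i.toNat], s2) := by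
      ext
      · simp [hq1, ← this]
      · simp [hq2]
    rwa [hqe] at hq
  · intro hq
    refine ⟨String.singleton cs[i.toNat], ?_, ?_⟩
    · simp only [pvPredL, List.mem_map, List.mem_filter, beq_iff_eq]
      exact ⟨(String.singleton cs[i.toNat], s2), ⟨hq, rfl⟩, rfl⟩
    · exact (hpos _).mpr rfl

lemma pv_val_eq (word : String) (D : List (String × String)) (i : Int)
    (h0 : 0 ≤ i) (h1 : i < (word.toList.length : Int)) :
    pvValA D word.toList (i, PySem.List.pyGetD word.toList i 'a')
    = ((PySem.List.enumerate word.toList 0).filter (fun p => pvCondB D word.toList i p)).map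
        (fun p => p.1) := by
  have hmle : (i + 1).toNat ≤ word.toList.length := by omega
  have hlen : (word.toList.take (i + 1).toNat).length = (i + 1).toNat := by
    rw [List.length_take]; omega
  have hcast : ((i + 1).toNat : Int) = i + 1 := by omega
  have hsplit : PySem.List.enumerate word.toList 0
      = PySem.List.enumerate (List.take (i + 1).toNat word.toList) 0
        ++ PySem.List.enumerate (List.drop (i + 1).toNat word.toList)
            (0 + ((List.take (i + 1).toNat word.toList).length : Int)) := by
    rw [← PySem.List.enumerate_append, List.take_append_drop]
  rw [hsplit, List.filter_append, List.map_append]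
  have hfirst : (PySem.List.enumerate (word.toList.take (i + 1).toNat) 0).filter
      (fun p => pvCondB D word.toList i p) = [] := by
    rw [List.filter_eq_nil_iff]
    intro p hp
    rw [PySem.List.mem_enumerate_iff] at hp
    obtain ⟨k, hk, rfl⟩ := hp
    simp only [pvCondB, Bool.and_eq_true, decide_eq_true_eq]
    intro ⟨hlt, _⟩
    rw [hlen] at hk
    omega
  rw [hfirst, hlen, hcast]
  simp only [List.map_nil, List.nil_append, zero_add]
  unfold pvValA
  rw [PySem.List.slice_from _ (by omega : (0:Int) ≤ i + 1)]
  apply congrArg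
  apply List.filter_congr
  intro p hp
  rw [PySem.List.mem_enumerate_iff] at hp
  obtain ⟨k, hk, rfl⟩ := hp
  simp only [pvCondB]
  have hlt : (i < i + 1 + (k : Int)) := by omega
  rw [decide_eq_true hlt, Bool.true_and]
  rw [pv_any_eq D word.toList i h0 h1]
  rfl

-- ===== VERDICT (by name: the statement is the Claim_ definition above) =====
theorem compute_dependency_graph_spec : Claim_equal_compute_dependency_graph := by
  intro word D _
  show compute_dependency_graph word D = compute_dependency_graph_alt word D
  rw [pvA_items, pvB_items]
  conv_lhs => rw [PySem.List.enumerate_eq_map_pyRange word.toList 'a', List.map_map]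
  simp only [PySem.List.len]
  apply List.map_congr_left
  intro i hi
  rw [PySem.List.mem_pyRange_one] at hi
  simp only [Function.comp]
  exact congrArg _ (pv_val_eq word D i hi.1 (by simpa using hi.2))
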